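-- pv_equiv track=rewrite | github.com/hisahi/termisanasto | muunto/tohtml.py | minfind
-- ===== SOURCE A (Python) =====
-- def safefind(haystack, needle, start = 0):
--     """
--     Hakee tekstistä tiettyä kohtaa ja palauttaa sijainnin, tai
--     tekstin pituuden jos osaa ei löytynyt.
--     """
--     length = len(haystack)
--     # (-1 % (length + 1)) => length
--     return haystack.find(needle, start) % (length + 1)
--
-- def minfind(haystack, needles, start = 0):
--     """
--     Hakee tekstistä tietystä kohtaa eri kohtia ja palauttaa sen, joka
--     on lähinnä alkua muodossa ("osa", kohta). Jos tuloksia ei löydy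
--     ollenkaan, palauttaa None.
--     """
--     length = len(haystack)
--     result = None
--
--     for needle in needles:
--         match = (needle, safefind(haystack, needle, start))
--         if match[1] < length:
--             if not result or result[1] > match[1] or (
--                     result[1] == match[1] and len(result[0]) < len(match[0])):
--                 result = match
--     return result
-- ===== SOURCE B (Python) =====
-- def minfind(haystack, needles, start = 0):
--     """
--     Position sweep: walk positions from the start offset; at the first
--     position where any needle matches, return the longest matching needle
--     (first-listed on a length tie) with that position; None if no match.
--     """
--     length = len(haystack)
--     s0 = start if start >= 0 else max(0, length + start)
--     for pos in range(s0, length):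
--         best = None
--         for needle in needles:
--             if haystack.startswith(needle, pos):
--                 if best is None or len(needle) > len(best):
--                     best = needle
--         if best is not None:
--             return (best, pos)
--     return None
-- ===== Notes on version B (the rewrite author's own statement) =====
-- stated objective: alternative
-- what changed: Replaces A's per-needle full substring search plus running-best selection by a position sweep that scans haystack positions from the start offset and returns at the first position where any needle matches (longest needle there, first-listed on a length tie), so it stops as soon as the earliest match is found instead of locating every needle's first occurrence.
import Mathlib
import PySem

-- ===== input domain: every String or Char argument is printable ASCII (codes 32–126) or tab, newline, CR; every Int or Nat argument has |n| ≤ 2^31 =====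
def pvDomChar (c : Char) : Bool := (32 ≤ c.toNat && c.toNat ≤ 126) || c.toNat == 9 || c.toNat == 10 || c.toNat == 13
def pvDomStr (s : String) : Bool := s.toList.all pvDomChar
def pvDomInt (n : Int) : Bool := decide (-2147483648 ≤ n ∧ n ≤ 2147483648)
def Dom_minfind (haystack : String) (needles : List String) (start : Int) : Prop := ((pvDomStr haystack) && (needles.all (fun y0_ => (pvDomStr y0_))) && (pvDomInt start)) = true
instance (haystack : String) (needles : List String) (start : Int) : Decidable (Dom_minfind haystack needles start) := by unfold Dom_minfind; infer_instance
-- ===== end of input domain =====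

-- B replaces A's per-needle substring search + running best by a position sweep
-- (first position with any match wins; longest needle there, first on ties); objective: alternative.

-- ===== PORT A =====
-- module helper of Source A: haystack.find(needle, start) % (len(haystack) + 1)
def safefind (haystack needle : String) (start : Int) : Int :=
  let length := PySem.Str.len haystack
  PySem.Int.mod (PySem.Str.findFrom haystack needle start) (length + 1)

def minfind (haystack : String) (needles : List String) (start : Int) : Option (String × Int) :=
  let length := PySem.Str.len haystack
  needles.foldl (fun result needle =>
    let m := (needle, safefind haystack needle start)
    if m.2 < length then
      match result with
      | none => some m
      | some r =>
        if r.2 > m.2 || (r.2 == m.2 && PySem.Str.len r.1 < PySem.Str.len m.1) then some m else some r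
    else result) none

-- ===== PORT B =====
-- inner loop of Source B: the longest needle matching at pos (first on a length tie).
-- haystack.startswith(needle, pos) with pos ≥ 0 is: needle is a prefix of haystack[pos:] (exact here,
-- pvSweep only passes pos from range(s0, length), so 0 ≤ pos).
def pvBestAt (hl : List Char) (needles : List String) (pos : Int) : Option String :=
  needles.foldl (fun best needle =>
    if PySem.Chars.startswith (hl.drop pos.toNat) needle.toList then
      match best with
      | none => some needle
      | some b => if PySem.Str.len needle > PySem.Str.len b then some needle else some b
    else best) none

-- the `for pos in range(s0, length)` loop with its early `return (best, pos)`
def pvSweep (hl : List Char) (needles : List String) : List Int → Option (String × Int)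
  | [] => none
  | p :: ps =>
    match pvBestAt hl needles p with
    | some b => some (b, p)
    | none => pvSweep hl needles ps

def minfind_alt (haystack : String) (needles : List String) (start : Int) : Option (String × Int) :=
  let length := PySem.Str.len haystack
  let s0 := if start ≥ 0 then start else max 0 (length + start)
  pvSweep haystack.toList needles (PySem.List.pyRange s0 length 1)

-- ===== PRECONDITION & SPEC =====
def Spec_minfind (haystack : String) (needles : List String) (start : Int) (out : Option (String × Int)) : Prop := out = minfind_alt haystack needles start
instance (haystack : String) (needles : List String) (start : Int) (out : Option (String × Int)) : Decidable (Spec_minfind haystack needles start out) := by unfold Spec_minfind; infer_instance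

-- ===== CLAIM (what is proved, stated in full; the proofs are below) =====
def Claim_equal_minfind : Prop := ∀ (haystack : String) (needles : List String) (start : Int), Dom_minfind haystack needles start → Spec_minfind haystack needles start (minfind haystack needles start)

-- ===== LEMMAS AND PROOFS =====

def pvClamp (start : Int) (L : Nat) : Int :=
  if start < 0 then (if start + L < 0 then 0 else start + L) else start

theorem pvFindFrom_char (haystack n : String) (start : Int) (s0 : Nat)
    (hs0 : pvClamp start haystack.toList.length = (s0 : Int))
    (hsL : s0 ≤ haystack.toList.length) :
    PySem.Str.findFrom haystack n start
      = if PySem.Chars.find (haystack.toList.drop s0) n.toList = -1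
        then -1
        else (s0 : Int) + PySem.Chars.find (haystack.toList.drop s0) n.toList := by
  simp only [PySem.Str.findFrom, PySem.Chars.findFrom]
  simp only [pvClamp] at hs0
  have hst : (if start < 0 then if start + ↑haystack.toList.length < 0 then 0 else start + ↑haystack.toList.length else start) = (s0 : Int) := hs0
  rw [hst]
  rw [if_neg (by omega : ¬ ((haystack.toList.length : Int) < (s0:Int)))]
  simp only [Int.toNat_natCast, List.take_length]

theorem pvNegOneFmod (L : Int) (hL0 : 0 ≤ L) : PySem.Int.mod (-1) (L + 1) = L := by
  have h1 : ((-1 : Int) % (L + 1)) = ((-1 + (L+1) * 1) % (L + 1)) := by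
    rw [Int.add_mul_emod_self_left]
  rw [PySem.Int.mod, Int.fmod_eq_emod, if_pos (Or.inl (by omega : (0:Int) ≤ L + 1)), add_zero,
    h1, Int.emod_eq_of_lt (by omega) (by omega)]
  ring

theorem pvSafefind_char (haystack n : String) (start : Int) (s0 : Nat)
    (hs0 : pvClamp start haystack.toList.length = (s0 : Int))
    (hsL : s0 ≤ haystack.toList.length) :
    safefind haystack n start
      = if PySem.Chars.find (haystack.toList.drop s0) n.toList = -1
        then (haystack.toList.length : Int)
        else (s0 : Int) + PySem.Chars.find (haystack.toList.drop s0) n.toList := by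
  have hlen : PySem.Str.len haystack = (haystack.toList.length : Int) := by
    simp [PySem.Str.len]
  simp only [safefind, pvFindFrom_char haystack n start s0 hs0 hsL, hlen]
  set L : Int := (haystack.toList.length : Int) with hL
  have hL0 : 0 ≤ L := by positivity
  split
  · exact pvNegOneFmod L hL0
  · rename_i hr
    have hge : 0 ≤ PySem.Chars.find (haystack.toList.drop s0) n.toList := by
      have := PySem.Chars.neg_one_le_find (haystack.toList.drop s0) n.toList
      omega
    have hle : PySem.Chars.find (haystack.toList.drop s0) n.toList ≤ ((haystack.toList.drop s0).length : Int) :=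
      PySem.Chars.find_le_length _ _
    have hdl : ((haystack.toList.drop s0).length : Int) = L - s0 := by
      rw [List.length_drop, Int.natCast_sub hsL]
    rw [hdl] at hle
    rw [PySem.Int.mod, Int.fmod_eq_emod, if_pos (Or.inl (by omega : (0:Int) ≤ L + 1)), add_zero,
      Int.emod_eq_of_lt (by omega) (by omega)]

theorem pvSafefind_big (haystack n : String) (start : Int)
    (h : (haystack.toList.length : Int) < pvClamp start haystack.toList.length) :
    safefind haystack n start = (haystack.toList.length : Int) := by
  have hlen : PySem.Str.len haystack = (haystack.toList.length : Int) := by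
    simp [PySem.Str.len]
  have hff : PySem.Str.findFrom haystack n start = -1 := by
    simp only [PySem.Str.findFrom, PySem.Chars.findFrom]
    simp only [pvClamp] at h
    rw [if_pos]
    exact h
  simp only [safefind, hff, hlen]
  exact pvNegOneFmod _ (by positivity)

theorem pvDropDrop (hl : List Char) (s0 q : Nat) (h : s0 ≤ q) :
    (hl.drop s0).drop (q - s0) = hl.drop q := by
  rw [List.drop_drop]
  congr 1
  omega

theorem pvClass (haystack n : String) (start : Int) (s0 p : Nat)
    (hs0 : pvClamp start haystack.toList.length = (s0 : Int))
    (hsL : s0 ≤ haystack.toList.length)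
    (hsp : s0 ≤ p)
    (H : ∀ q, s0 ≤ q → q < p → ¬ (n.toList <+: haystack.toList.drop q)) :
    (PySem.Chars.startswith (haystack.toList.drop p) n.toList = true → safefind haystack n start = (p : Int)) ∧
    (PySem.Chars.startswith (haystack.toList.drop p) n.toList = false →
      safefind haystack n start < (haystack.toList.length : Int) → (p : Int) < safefind haystack n start) := by
  have hchar := pvSafefind_char haystack n start s0 hs0 hsL
  set hl := haystack.toList with hhl
  set cs := hl.drop s0 with hcs
  set sub := n.toList with hsub
  constructor
  · intro hm
    have hm' : sub <+: hl.drop p := (PySem.Chars.startswith_iff _ _).mp hm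
    have hmcs : sub <+: cs.drop (p - s0) := by rw [hcs, pvDropDrop hl s0 p hsp]; exact hm'
    have hinf : sub <:+: cs := hmcs.isInfix.trans (List.drop_suffix _ _).isInfix
    have hne : PySem.Chars.find cs sub ≠ -1 := (PySem.Chars.find_ne_neg_one_iff cs sub).mpr hinf
    have hge : 0 ≤ PySem.Chars.find cs sub := by
      have := PySem.Chars.neg_one_le_find cs sub; omega
    obtain ⟨hpre, hmin⟩ := PySem.Chars.find_spec hge
    have h1 : (PySem.Chars.find cs sub).toNat ≤ p - s0 := by
      by_contra hgt
      exact hmin (p - s0) (by omega) hmcs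
    have h2 : p ≤ s0 + (PySem.Chars.find cs sub).toNat := by
      by_contra hlt
      refine H (s0 + (PySem.Chars.find cs sub).toNat) (by omega) (by omega) ?_
      have heq := pvDropDrop hl s0 (s0 + (PySem.Chars.find cs sub).toNat) (Nat.le_add_right _ _)
      rw [Nat.add_sub_cancel_left] at heq
      rw [← heq]; exact hpre
    rw [hchar, if_neg hne]
    omega
  · intro hm hlt
    rw [hchar] at hlt ⊢
    by_cases hne : PySem.Chars.find cs sub = -1
    · rw [if_pos hne] at hlt; omega
    · rw [if_neg hne] at hlt ⊢
      have hge : 0 ≤ PySem.Chars.find cs sub := by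
        have := PySem.Chars.neg_one_le_find cs sub; omega
      obtain ⟨hpre, hmin⟩ := PySem.Chars.find_spec hge
      have hpre' : sub <+: hl.drop (s0 + (PySem.Chars.find cs sub).toNat) := by
        have heq := pvDropDrop hl s0 (s0 + (PySem.Chars.find cs sub).toNat) (Nat.le_add_right _ _)
        rw [Nat.add_sub_cancel_left] at heq
        rw [← heq]; exact hpre
      have hq : ¬ (s0 + (PySem.Chars.find cs sub).toNat < p) := fun hq =>
        H _ (by omega) hq hpre'
      have hne2 : s0 + (PySem.Chars.find cs sub).toNat ≠ p := by
        intro he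
        rw [he] at hpre'
        rw [(PySem.Chars.startswith_iff _ _).symm.mp ?_] at hm
        · exact Bool.true_eq_false.mp hm
        · exact hpre'
      omega

theorem pvAllBig (haystack n : String) (start : Int) (s0 : Nat)
    (hs0 : pvClamp start haystack.toList.length = (s0 : Int))
    (hsL : s0 ≤ haystack.toList.length)
    (H : ∀ q, s0 ≤ q → q < haystack.toList.length → ¬ (n.toList <+: haystack.toList.drop q)) :
    ¬ safefind haystack n start < (haystack.toList.length : Int) := by
  have hchar := pvSafefind_char haystack n start s0 hs0 hsL
  intro hlt
  rw [hchar] at hlt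
  by_cases hne : PySem.Chars.find (haystack.toList.drop s0) n.toList = -1
  · rw [if_pos hne] at hlt; omega
  · rw [if_neg hne] at hlt
    have hge : 0 ≤ PySem.Chars.find (haystack.toList.drop s0) n.toList := by
      have := PySem.Chars.neg_one_le_find (haystack.toList.drop s0) n.toList; omega
    obtain ⟨hpre, hmin⟩ := PySem.Chars.find_spec hge
    have hpre' : n.toList <+: haystack.toList.drop (s0 + (PySem.Chars.find (haystack.toList.drop s0) n.toList).toNat) := by
      have heq := pvDropDrop haystack.toList s0 (s0 + (PySem.Chars.find (haystack.toList.drop s0) n.toList).toNat) (Nat.le_add_right _ _)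
      rw [Nat.add_sub_cancel_left] at heq
      rw [← heq]; exact hpre
    exact H _ (by omega) (by omega) hpre'

def pvStepA (Lg : Int) (f : String → Int) : Option (String × Int) → String → Option (String × Int) :=
  fun result needle =>
    let m := (needle, f needle)
    if m.2 < Lg then
      match result with
      | none => some m
      | some r =>
        if r.2 > m.2 || (r.2 == m.2 && PySem.Str.len r.1 < PySem.Str.len m.1) then some m else some r
    else result

def pvStepB (mt : String → Bool) : Option String → String → Option String :=
  fun best needle =>
    if mt needle then
      match best with
      | none => some needle
      | some b => if PySem.Str.len needle > PySem.Str.len b then some needle else some b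
    else best

theorem pvStepA_some_cases (Lg : Int) (f : String → Int) (aa : Option (String × Int)) (n : String) :
    pvStepA Lg f aa n = aa ∨ (pvStepA Lg f aa n = some (n, f n) ∧ f n < Lg) := by
  by_cases hflt : f n < Lg
  · cases aa with
    | none => exact Or.inr ⟨by simp [pvStepA, hflt], hflt⟩
    | some r =>
      by_cases hcond : (decide (r.2 > f n) || (r.2 == f n && decide (PySem.Str.len r.1 < PySem.Str.len n))) = true
      · exact Or.inr ⟨by simp only [pvStepA, if_pos hflt]; rw [if_pos hcond], hflt⟩
      · exact Or.inl (by simp only [pvStepA, if_pos hflt]; rw [if_neg hcond])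
  · exact Or.inl (by simp [pvStepA, hflt])

theorem pvFoldRel (Lg p : Int) (f : String → Int) (mt : String → Bool) (hpL : p < Lg)
    (ns : List String)
    (hc : ∀ n ∈ ns, (mt n = true → f n = p) ∧ (mt n = false → f n < Lg → p < f n)) :
    ∀ (bb : Option String) (aa : Option (String × Int)),
      (∀ s, bb = some s → aa = some (s, p)) →
      (bb = none → aa = none ∨ ∃ r, aa = some r ∧ p < r.2) →
      (∀ s, ns.foldl (pvStepB mt) bb = some s →
          ns.foldl (pvStepA Lg f) aa = some (s, p)) ∧
      (ns.foldl (pvStepB mt) bb = none →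
          ns.foldl (pvStepA Lg f) aa = none ∨ ∃ r, ns.foldl (pvStepA Lg f) aa = some r ∧ p < r.2) := by
  induction ns with
  | nil =>
    intro bb aa h1 h2
    exact ⟨h1, h2⟩
  | cons n ns ih =>
    intro bb aa h1 h2
    have hcn := hc n (by simp)
    have hcr : ∀ m ∈ ns, (mt m = true → f m = p) ∧ (mt m = false → f m < Lg → p < f m) :=
      fun m hm => hc m (by simp [hm])
    simp only [List.foldl_cons]
    apply ih hcr
    · -- invariant 1 transfers across one step
      intro s hs
      by_cases hm : mt n = true
      · have hfp := hcn.1 hm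
        cases bb with
        | none =>
          have hsn : n = s := by simpa [pvStepB, hm] using hs
          subst hsn
          rcases h2 rfl with ha | ⟨r, har, hr⟩
          · subst ha
            simp [pvStepA, hfp, hpL]
          · subst har
            simp [pvStepA, hfp, hpL, hr]
        | some b =>
          have hab := h1 b rfl
          subst hab
          simp only [pvStepB, hm, if_true] at hs
          by_cases hlen : PySem.Str.len b < PySem.Str.len n
          · rw [if_pos (by simpa [gt_iff_lt] using hlen)] at hs
            cases hs
            simp only [pvStepA, hfp, if_pos hpL]
            rw [if_pos (by simpa [PySem.Str.len] using hlen)]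
          · rw [if_neg (by simpa [gt_iff_lt] using hlen)] at hs
            cases hs
            simp only [pvStepA, hfp, if_pos hpL]
            rw [if_neg (by simpa [PySem.Str.len] using hlen)]
      · have hmf : mt n = false := by simpa using hm
        simp only [pvStepB, hmf, Bool.false_eq_true, if_false] at hs
        have haa := h1 s hs
        rw [haa]
        by_cases hflt : f n < Lg
        · have hpf := hcn.2 hmf hflt
          have c1 : ¬ ((p : Int) > f n) := by omega
          have c2 : (p == f n) = false := by simp; omega
          simp [pvStepA, hflt, c1, c2]
        · simp [pvStepA, hflt]
    · -- invariant 2 transfers across one step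
      intro hs
      by_cases hm : mt n = true
      · exfalso
        cases bb with
        | none => simp [pvStepB, hm] at hs
        | some b =>
          simp only [pvStepB, hm, if_true] at hs
          split at hs <;> simp at hs
      · have hmf : mt n = false := by simpa using hm
        simp only [pvStepB, hmf, Bool.false_eq_true, if_false] at hs
        rcases pvStepA_some_cases Lg f aa n with he | ⟨he, hflt⟩
        · rw [he]; exact h2 hs
        · rw [he]; exact Or.inr ⟨_, rfl, hcn.2 hmf hflt⟩

theorem pvMinfind_eq_fold (haystack : String) (needles : List String) (start : Int) :
    minfind haystack needles start
      = needles.foldl (pvStepA (PySem.Str.len haystack) (fun n => safefind haystack n start)) none := rfl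

theorem pvBestAt_eq_fold (hl : List Char) (needles : List String) (pos : Int) :
    pvBestAt hl needles pos
      = needles.foldl (pvStepB (fun n => PySem.Chars.startswith (hl.drop pos.toNat) n.toList)) none := rfl

theorem pvFoldA_skip (Lg : Int) (f : String → Int) (ns : List String)
    (h : ∀ n ∈ ns, ¬ f n < Lg) (acc : Option (String × Int)) :
    ns.foldl (pvStepA Lg f) acc = acc := by
  induction ns generalizing acc with
  | nil => rfl
  | cons n ns ih =>
    have hn := h n (by simp)
    simp only [List.foldl_cons]
    rw [show pvStepA Lg f acc n = acc by simp [pvStepA, hn]]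
    exact ih (fun m hm => h m (by simp [hm])) acc

theorem pvFoldB_none (mt : String → Bool) (ns : List String) :
    ∀ bb, ns.foldl (pvStepB mt) bb = none → bb = none ∧ ∀ n ∈ ns, mt n = false := by
  induction ns with
  | nil => intro bb h; simpa using h
  | cons n ns ih =>
    intro bb h
    simp only [List.foldl_cons] at h
    obtain ⟨hstep, hrest⟩ := ih _ h
    have hmn : mt n = false := by
      by_contra hmt
      simp only [Bool.not_eq_false] at hmt
      simp only [pvStepB, hmt, if_true] at hstep
      cases bb with
      | none => simp at hstep
      | some b =>
        simp only [] at hstep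
        split at hstep <;> simp at hstep
    refine ⟨?_, ?_⟩
    · simpa [pvStepB, hmn] using hstep
    · intro m hm
      rcases List.mem_cons.mp hm with rfl | hm
      · exact hmn
      · exact hrest m hm

theorem pvRange_nil' (a b : Int) (h : b ≤ a) : PySem.List.pyRange a b 1 = [] := by
  simp [PySem.List.pyRange, not_lt.mpr h]

theorem pvClamp_nonneg (start : Int) (L : Nat) : 0 ≤ pvClamp start L := by
  simp only [pvClamp]; split_ifs <;> omega

theorem pvMain (haystack : String) (needles : List String) (start : Int) (s0 : Nat)
    (hs0 : pvClamp start haystack.toList.length = (s0 : Int))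
    (hsL : s0 ≤ haystack.toList.length) :
    ∀ (k p : Nat), s0 ≤ p → haystack.toList.length ≤ p + k →
      (∀ n ∈ needles, ∀ q, s0 ≤ q → q < p → ¬ (n.toList <+: haystack.toList.drop q)) →
      needles.foldl (pvStepA (PySem.Str.len haystack) (fun n => safefind haystack n start)) none
        = pvSweep haystack.toList needles (PySem.List.pyRange (p : Int) (PySem.Str.len haystack) 1) := by
  have hlen : PySem.Str.len haystack = (haystack.toList.length : Int) := by
    simp [PySem.Str.len]
  intro k
  induction k with
  | zero =>
    intro p hsp hLp H
    rw [pvRange_nil' _ _ (by rw [hlen]; exact_mod_cast hLp)]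
    simp only [pvSweep]
    apply pvFoldA_skip
    intro n hn
    rw [hlen]
    exact pvAllBig haystack n start s0 hs0 hsL
      (fun q hq1 hq2 => H n hn q hq1 (by omega))
  | succ k ih =>
    intro p hsp hLp H
    by_cases hpL : haystack.toList.length ≤ p
    · rw [pvRange_nil' _ _ (by rw [hlen]; exact_mod_cast hpL)]
      simp only [pvSweep]
      apply pvFoldA_skip
      intro n hn
      rw [hlen]
      exact pvAllBig haystack n start s0 hs0 hsL
        (fun q hq1 hq2 => H n hn q hq1 (by omega))
    · have hpL' : p < haystack.toList.length := by omega
      rw [PySem.List.pyRange_one_cons (by rw [hlen]; exact_mod_cast hpL')]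
      simp only [pvSweep]
      cases hb : pvBestAt haystack.toList needles (p : Int) with
      | some b =>
        rw [pvBestAt_eq_fold] at hb
        simp only [Int.toNat_natCast] at hb
        have hclass : ∀ n ∈ needles,
            ((fun n => PySem.Chars.startswith (haystack.toList.drop p) n.toList) n = true →
              (fun n => safefind haystack n start) n = (p : Int)) ∧
            ((fun n => PySem.Chars.startswith (haystack.toList.drop p) n.toList) n = false →
              (fun n => safefind haystack n start) n < PySem.Str.len haystack →
              (p : Int) < (fun n => safefind haystack n start) n) := by
          intro n hn
          have := pvClass haystack n start s0 p hs0 hsL hsp (H n hn)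
          refine ⟨this.1, fun h1 h2 => this.2 h1 ?_⟩
          rwa [hlen] at h2
        have hrel := pvFoldRel (PySem.Str.len haystack) (p : Int)
          (fun n => safefind haystack n start)
          (fun n => PySem.Chars.startswith (haystack.toList.drop p) n.toList)
          (by rw [hlen]; exact_mod_cast hpL') needles hclass none none
          (fun s hs => by cases hs) (fun _ => Or.inl rfl)
        exact hrel.1 b hb
      | none =>
        rw [pvBestAt_eq_fold] at hb
        simp only [Int.toNat_natCast] at hb
        obtain ⟨-, hall⟩ := pvFoldB_none _ _ _ hb
        have H' : ∀ n ∈ needles, ∀ q, s0 ≤ q → q < p + 1 → ¬ (n.toList <+: haystack.toList.drop q) := by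
          intro n hn q hq1 hq2
          by_cases hqp : q < p
          · exact H n hn q hq1 hqp
          · have hqe : q = p := by omega
            subst hqe
            intro hpre
            have := (PySem.Chars.startswith_iff (haystack.toList.drop q) n.toList).mpr hpre
            rw [hall n hn] at this
            exact Bool.false_ne_true this
        have := ih (p + 1) (by omega) (by omega) H'
        rw [show (((p:Nat) + 1 : Nat) : Int) = (p : Int) + 1 by push_cast; ring] at this
        exact this

theorem pvFinal (haystack : String) (needles : List String) (start : Int) :
    minfind haystack needles start = minfind_alt haystack needles start := by
  have hlen : PySem.Str.len haystack = (haystack.toList.length : Int) := by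
    simp [PySem.Str.len]
  have hs0B : (if start ≥ 0 then start else max 0 (PySem.Str.len haystack + start))
      = pvClamp start haystack.toList.length := by
    simp only [pvClamp, hlen]; split_ifs <;> omega
  rw [pvMinfind_eq_fold]
  simp only [minfind_alt]
  rw [hs0B]
  by_cases hc : pvClamp start haystack.toList.length ≤ (haystack.toList.length : Int)
  · have h0 := pvClamp_nonneg start haystack.toList.length
    set s0 : Nat := (pvClamp start haystack.toList.length).toNat with hs0def
    have hs0 : pvClamp start haystack.toList.length = (s0 : Int) := (Int.toNat_of_nonneg h0).symm
    have hsL : s0 ≤ haystack.toList.length := by omega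
    rw [hs0]
    exact pvMain haystack needles start s0 hs0 hsL (haystack.toList.length - s0) s0
      (le_refl s0) (by omega) (fun n hn q hq1 hq2 => absurd hq1 (by omega))
  · rw [pvRange_nil' _ _ (by rw [hlen]; omega)]
    simp only [pvSweep]
    apply pvFoldA_skip
    intro n hn
    rw [hlen, pvSafefind_big haystack n start (by omega)]
    omega

-- ===== VERDICT (by name: the statement is the Claim_ definition above) =====
theorem minfind_spec : Claim_equal_minfind := by
  intro haystack needles start _
  unfold Spec_minfind
  exact pvFinal haystack needles start
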